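-- pv_equiv track=rewrite | github.com/wenxi325/Crossword | crossword.py | resize_crossword
-- ===== SOURCE A (Python) =====
-- def resize_crossword(crossword):
--     resized_crossword = []
--
--     for y in range(0, len(crossword)):
--         row = crossword[y][0:len(crossword[0])]
--         # Check if the row is not completely blank
--         if any(cell != ' ' for cell in row):
--             resized_crossword.append(row)
--
--     # Transpose the resized crossword to handle blank columns
--     resized_crossword_transposed = list(map(list, zip(*resized_crossword)))
--
--     # Remove blank rows from the transposed crossword
--     final_resized_crossword = []
--
--     for y in range(len(resized_crossword_transposed)):
--         row = resized_crossword_transposed[y]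
--         # Check if the row is not completely blank
--         if any(cell != ' ' for cell in row):
--             final_resized_crossword.append(row)
--
--     # Transpose back to the original orientation
--     final_resized_crossword = list(map(list, zip(*final_resized_crossword)))
--
--     return final_resized_crossword
-- ===== SOURCE B (Python) =====
-- def resize_crossword(crossword):
--     if not crossword:
--         return []
--     L = len(crossword[0])
--     kept_rows = [row[0:L] for row in crossword if any(c != ' ' for c in row[0:L])]
--     if not kept_rows:
--         return []
--     M = min(len(r) for r in kept_rows)
--     kept_cols = [j for j in range(M) if any(r[j] != ' ' for r in kept_rows)]
--     if not kept_cols: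
--         return []
--     return [[r[j] for j in kept_cols] for r in kept_rows]
-- ===== Notes on version B (the rewrite author's own statement) =====
-- stated objective: simpler
-- what changed: B selects kept row and kept column indices once and builds the result by direct index-mask selection, instead of A's two zip-transposes with intermediate column-row filtering.
import Mathlib
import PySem

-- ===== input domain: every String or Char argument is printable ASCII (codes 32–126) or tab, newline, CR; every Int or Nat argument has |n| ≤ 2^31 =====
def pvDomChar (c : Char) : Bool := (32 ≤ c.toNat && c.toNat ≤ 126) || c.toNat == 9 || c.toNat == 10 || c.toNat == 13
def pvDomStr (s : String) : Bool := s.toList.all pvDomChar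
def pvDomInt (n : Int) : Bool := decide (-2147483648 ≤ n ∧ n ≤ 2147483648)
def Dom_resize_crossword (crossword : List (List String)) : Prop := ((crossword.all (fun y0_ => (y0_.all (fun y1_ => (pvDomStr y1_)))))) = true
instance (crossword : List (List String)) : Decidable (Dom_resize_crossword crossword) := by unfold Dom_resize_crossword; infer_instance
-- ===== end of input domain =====

-- B removes blank rows and columns by index-mask selection (kept-column indices picked
-- once, rows filtered once) instead of A's two zip-transposes; objective: simpler.

-- ===== PORT A =====
-- model of Python's `list(map(list, zip(*rows)))`: result length = min row length,
-- entry j = the j-th cell of every row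
def zipStar (rows : List (List String)) : List (List String) :=
  match rows with
  | [] => []
  | r :: rs =>
    let m := rs.foldl (fun a b => min a b.length) r.length
    (List.range m).map (fun j => (r :: rs).map (fun row => row.getD j ""))

def resize_crossword (crossword : List (List String)) : List (List String) :=
  let L := (crossword.headD []).length
  let resized := crossword.foldl
    (fun acc y => if (y.take L).any (fun c => c != " ") then acc ++ [y.take L] else acc) []
  let transposed := zipStar resized
  let final := transposed.foldl
    (fun acc row => if row.any (fun c => c != " ") then acc ++ [row] else acc) []
  zipStar final

-- ===== PORT B =====
def resize_crossword_alt (crossword : List (List String)) : List (List String) :=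
  match crossword with
  | [] => []
  | first :: _ =>
    let L := first.length
    let keptRows := (crossword.map (fun row => row.take L)).filter
      (fun r => r.any (fun c => c != " "))
    match keptRows with
    | [] => []
    | r0 :: rest =>
      let M := rest.foldl (fun a b => min a b.length) r0.length
      let keptCols := (List.range M).filter
        (fun j => (r0 :: rest).any (fun r => r.getD j "" != " "))
      if keptCols.isEmpty then []
      else (r0 :: rest).map (fun r => keptCols.map (fun j => r.getD j ""))

-- ===== PRECONDITION & SPEC =====
def Spec_resize_crossword (crossword : List (List String)) (out : List (List String)) : Prop := out = resize_crossword_alt crossword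
instance (crossword : List (List String)) (out : List (List String)) : Decidable (Spec_resize_crossword crossword out) := by unfold Spec_resize_crossword; infer_instance

-- ===== CLAIM (what is proved, stated in full; the proofs are below) =====
def Claim_equal_resize_crossword : Prop := ∀ (crossword : List (List String)), Dom_resize_crossword crossword → Spec_resize_crossword crossword (resize_crossword crossword)

-- ===== LEMMAS AND PROOFS =====

-- the accumulate-if loop is filter
theorem pv_foldl_append_if {α β : Type} (p : β → Bool) (f : α → β) (l : List α)
    (acc : List β) :
    l.foldl (fun a x => if p (f x) then a ++ [f x] else a) acc
      = acc ++ ((l.map f).filter p) := by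
  induction l generalizing acc with
  | nil => simp
  | cons x xs ih =>
    by_cases h : p (f x) <;> simp [h, ih]

theorem pv_foldl_append_if_id {β : Type} (p : β → Bool) (l : List β) (acc : List β) :
    l.foldl (fun a x => if p x then a ++ [x] else a) acc = acc ++ l.filter p := by
  induction l generalizing acc with
  | nil => simp
  | cons x xs ih =>
    by_cases h : p x <;> simp [h, ih]

theorem pv_minfold_const {α : Type} (n : Nat) (f : α → List String)
    (hf : ∀ a, (f a).length = n) (l : List α) :
    (l.map f).foldl (fun a b => min a b.length) n = n := by
  induction l with
  | nil => rfl
  | cons x xs ih => simp [hf, ih]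

theorem pv_getD_map {α β : Type} (f : α → β) (l : List α) (i : Nat) (d : β)
    (h : i < l.length) : (l.map f).getD i d = f l[i] := by
  simp [List.getD_eq_getElem?_getD, h]

-- verdict proof below
theorem pv_transpose_back (rows : List (List String)) (cols : List Nat) :
    (List.range rows.length).map (fun i =>
      (cols.map (fun j => rows.map (fun row => row.getD j ""))).map (fun col => col.getD i ""))
    = rows.map (fun r => cols.map (fun j => r.getD j "")) := by
  apply List.ext_getElem
  · simp
  · intro i h1 h2
    simp only [List.getElem_map, List.getElem_range, List.map_map] at h1 ⊢
    apply List.map_congr_left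
    intro j _
    simp only [Function.comp]
    exact pv_getD_map _ rows i "" (by simpa using h1)

theorem resize_crossword_spec : Claim_equal_resize_crossword := by
  intro crossword _
  unfold Spec_resize_crossword
  cases crossword with
  | nil => rfl
  | cons first tail =>
    simp only [resize_crossword, resize_crossword_alt, List.headD_cons]
    rw [pv_foldl_append_if (fun (r : List String) => r.any (fun c => c != " ")) (fun (y : List String) => y.take first.length)]
    rw [List.nil_append]
    cases hrows : ((first :: tail).map (fun y => y.take first.length)).filter
        (fun r => r.any (fun c => c != " ")) with
    | nil => rfl
    | cons r0 rest =>
      simp only [zipStar]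
      rw [pv_foldl_append_if_id (fun (row : List String) => row.any (fun c => c != " "))]
      simp only [List.nil_append]
      set M := rest.foldl (fun a b => min a b.length) r0.length with hM
      set colfun : Nat → List String := fun j => (r0 :: rest).map (fun row => row.getD j "")
        with hcol
      have hfilt : ((List.range M).map colfun).filter (fun row => row.any (fun c => c != " "))
          = ((List.range M).filter
              (fun j => (r0 :: rest).any (fun r => r.getD j "" != " "))).map colfun := by
        rw [List.filter_map]
        congr 1
        apply List.filter_congr
        intro j _
        simp [hcol, List.any_map, Function.comp_def]
      rw [hfilt]
      cases hcols : (List.range M).filter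
          (fun j => (r0 :: rest).any (fun r => r.getD j "" != " ")) with
      | nil => rfl
      | cons j0 js =>
        simp only [List.map_cons, List.isEmpty_cons, Bool.false_eq_true, if_false]
        have hlen : ∀ j, (colfun j).length = (r0 :: rest).length := by
          intro j; simp [hcol]
        have hmin : (js.map colfun).foldl (fun a b => min a b.length) (colfun j0).length
            = (r0 :: rest).length := by
          rw [hlen j0]
          exact pv_minfold_const _ colfun hlen js
        rw [hmin]
        simp only [hcol]
        exact pv_transpose_back (r0 :: rest) (j0 :: js)

-- ===== VERDICT (by name: the statement is the Claim_ definition above) =====
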